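-- pv_equiv track=rewrite | github.com/abhineetjain13/Crawlwise | backend/app/services/site_memory_service.py | _merge_selector_rows
-- ===== SOURCE A (Python) =====
-- def _selector_key(row: dict) -> tuple[str, str, str]:
--     return (
--         str(row.get("css_selector") or "").strip(),
--         str(row.get("xpath") or "").strip(),
--         str(row.get("regex") or "").strip(),
--     )
--
-- def _normalize_selector_rows(rows: list[dict] | None) -> list[dict]:
--     normalized: list[dict] = []
--     seen: set[tuple[str, str, str]] = set()
--     for row in rows or []:
--         if not isinstance(row, dict):
--             continue
--         value = {
--             "css_selector": str(row.get("css_selector") or "").strip() or None,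
--             "xpath": str(row.get("xpath") or "").strip() or None,
--             "regex": str(row.get("regex") or "").strip() or None,
--             "status": str(row.get("status") or "validated").strip() or "validated",
--             "sample_value": str(row.get("sample_value") or "").strip() or None,
--             "source": str(row.get("source") or "site_memory").strip() or "site_memory",
--         }
--         if not any([value["css_selector"], value["xpath"], value["regex"]]):
--             continue
--         fingerprint = _selector_key(value)
--         if fingerprint in seen:
--             continue
--         seen.add(fingerprint)
--         normalized.append(value)
--     return normalized
--
-- def _merge_selector_rows(existing: list[dict], incoming: list[dict]) -> list[dict]:
--     merged = _normalize_selector_rows(existing)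
--     seen = {_selector_key(row) for row in merged}
--     for row in _normalize_selector_rows(incoming):
--         fingerprint = _selector_key(row)
--         if fingerprint in seen:
--             continue
--         seen.add(fingerprint)
--         merged.append(row)
--     return merged
-- ===== SOURCE B (Python) =====
-- def _normalize_selector_row(row: dict):
--     """Pure per-row normalization: returns (key, value) or None if the row has
--     no selector content."""
--     def field(name, default=""):
--         return str(row.get(name) or default).strip() or (default or None)
--
--     css = field("css_selector")
--     xpath = field("xpath")
--     regex = field("regex")
--     if not (css or xpath or regex):
--         return None
--     value = {
--         "css_selector": css,
--         "xpath": xpath,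
--         "regex": regex,
--         "status": field("status", "validated"),
--         "sample_value": field("sample_value"),
--         "source": field("source", "site_memory"),
--     }
--     return (css or "", xpath or "", regex or ""), value
--
--
-- def _merge_selector_rows(existing: list[dict], incoming: list[dict]) -> list[dict]:
--     # Index the rows by their selector key in one insertion-ordered dict:
--     # setdefault keeps the first occurrence, so existing rows win over incoming
--     # ones and duplicates collapse; the dict's values are the merged list.
--     by_key: dict[tuple[str, str, str], dict] = {}
--     for row in (existing or []) + (incoming or []):
--         if not isinstance(row, dict):
--             continue
--         normalized = _normalize_selector_row(row)
--         if normalized is None: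
--             continue
--         key, value = normalized
--         by_key.setdefault(key, value)
--     return list(by_key.values())
-- ===== Notes on version B (the rewrite author's own statement) =====
-- stated objective: simpler
-- what changed: B drops A's three stateful structures (normalized list + seen set per pass, then a second explicit dedup loop) and instead indexes the concatenated rows once into an insertion-ordered dict keyed by the selector fingerprint via setdefault (first occurrence wins), returning the dict's values.
import Mathlib
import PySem

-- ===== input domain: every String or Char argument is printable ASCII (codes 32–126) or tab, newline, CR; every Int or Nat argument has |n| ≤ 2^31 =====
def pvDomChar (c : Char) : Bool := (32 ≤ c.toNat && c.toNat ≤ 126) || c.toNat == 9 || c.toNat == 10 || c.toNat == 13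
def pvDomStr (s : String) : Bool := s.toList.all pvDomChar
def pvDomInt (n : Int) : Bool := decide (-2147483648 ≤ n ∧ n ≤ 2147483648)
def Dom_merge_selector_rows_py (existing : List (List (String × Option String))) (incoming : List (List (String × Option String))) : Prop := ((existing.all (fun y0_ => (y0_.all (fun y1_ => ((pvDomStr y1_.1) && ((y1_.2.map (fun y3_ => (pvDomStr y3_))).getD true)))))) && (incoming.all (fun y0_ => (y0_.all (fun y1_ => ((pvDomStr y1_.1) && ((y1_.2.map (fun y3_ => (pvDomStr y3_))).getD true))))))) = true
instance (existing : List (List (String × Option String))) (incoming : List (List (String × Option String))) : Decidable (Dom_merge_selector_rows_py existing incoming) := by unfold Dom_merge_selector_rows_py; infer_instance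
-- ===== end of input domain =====

-- B replaces A's normalize-then-second-dedup-loop (list + seen set) with a single
-- insertion-ordered dict indexed by selector key, filled with setdefault (first
-- occurrence wins) and read out via values(); objective: simpler.

-- ===== PORT A =====
-- shared module helpers: str(row.get(k) or "").strip()
def pvRawStr (row : List (String × Option String)) (k : String) : String :=
  PySem.Str.strip (((PySem.Dict.get? (PySem.Dict.mk row) k).join).getD "")

-- 's or None' on an already-stripped string
def pvOptStr (s : String) : Option String := if s = "" then none else some s

-- str(row.get(k) or d).strip() or d
def pvDefStr (row : List (String × Option String)) (k d : String) : String :=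
  let raw := ((PySem.Dict.get? (PySem.Dict.mk row) k).join).getD ""
  let s := PySem.Str.strip (if raw = "" then d else raw)
  if s = "" then d else s

-- the normalized 'value' dict built in A's loop body (distinct literal keys, insertion order)
def pvValue (row : List (String × Option String)) : List (String × Option String) :=
  [("css_selector", pvOptStr (pvRawStr row "css_selector")),
   ("xpath", pvOptStr (pvRawStr row "xpath")),
   ("regex", pvOptStr (pvRawStr row "regex")),
   ("status", some (pvDefStr row "status" "validated")),
   ("sample_value", pvOptStr (pvRawStr row "sample_value")),
   ("source", some (pvDefStr row "source" "site_memory"))]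

-- _selector_key(row)
def pvSelectorKey (row : List (String × Option String)) : String × String × String :=
  (pvRawStr row "css_selector", pvRawStr row "xpath", pvRawStr row "regex")

-- one iteration of _normalize_selector_rows' loop (state = (seen, normalized));
-- the 'isinstance(row, dict)' guard is always true under the typed domain and is dropped
def pvNormStep (st : PySem.Set (String × String × String) × List (List (String × Option String)))
    (row : List (String × Option String)) :
    PySem.Set (String × String × String) × List (List (String × Option String)) :=
  let value := pvValue row
  if (pvOptStr (pvRawStr row "css_selector")).isNone &&
     (pvOptStr (pvRawStr row "xpath")).isNone &&
     (pvOptStr (pvRawStr row "regex")).isNone then st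
  else
    let fingerprint := pvSelectorKey value
    if PySem.Set.contains st.1 fingerprint then st
    else (PySem.Set.add st.1 fingerprint, st.2 ++ [value])

-- _normalize_selector_rows (module helper used by A)
def pvNormalizeRows (rows : List (List (String × Option String))) : List (List (String × Option String)) :=
  (rows.foldl pvNormStep (PySem.Set.empty, [])).2

def merge_selector_rows_py (existing : List (List (String × Option String))) (incoming : List (List (String × Option String))) : List (List (String × Option String)) :=
  let merged := pvNormalizeRows existing
  let seen : PySem.Set (String × String × String) := PySem.Set.ofList (merged.map pvSelectorKey)
  ((pvNormalizeRows incoming).foldl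
    (fun st row =>
      let fingerprint := pvSelectorKey row
      if PySem.Set.contains st.1 fingerprint then st
      else (PySem.Set.add st.1 fingerprint, st.2 ++ [row]))
    (seen, merged)).2

-- ===== PORT B =====
-- _normalize_selector_row(row): (key, value) of one row, or none when it has no selector content
def pvNormalizeRow (row : List (String × Option String)) :
    Option ((String × String × String) × List (String × Option String)) :=
  let css := pvOptStr (pvRawStr row "css_selector")
  let xpath := pvOptStr (pvRawStr row "xpath")
  let regex := pvOptStr (pvRawStr row "regex")
  if css.isNone && xpath.isNone && regex.isNone then none
  else some ((css.getD "", xpath.getD "", regex.getD ""),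
    [("css_selector", css), ("xpath", xpath), ("regex", regex),
     ("status", some (pvDefStr row "status" "validated")),
     ("sample_value", pvOptStr (pvRawStr row "sample_value")),
     ("source", some (pvDefStr row "source" "site_memory"))])

-- the body of B's single loop: by_key.setdefault(key, value)
def pvBStep (d : PySem.Dict (String × String × String) (List (String × Option String)))
    (row : List (String × Option String)) :
    PySem.Dict (String × String × String) (List (String × Option String)) :=
  match pvNormalizeRow row with
  | none => d
  | some kv => PySem.Dict.setdefault d kv.1 kv.2

def merge_selector_rows_py_alt (existing : List (List (String × Option String))) (incoming : List (List (String × Option String))) : List (List (String × Option String)) :=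
  PySem.Dict.values ((existing ++ incoming).foldl pvBStep PySem.Dict.empty)

-- ===== PRECONDITION & SPEC =====
def Spec_merge_selector_rows_py (existing : List (List (String × Option String))) (incoming : List (List (String × Option String))) (out : List (List (String × Option String))) : Prop := out = merge_selector_rows_py_alt existing incoming
instance (existing : List (List (String × Option String))) (incoming : List (List (String × Option String))) (out : List (List (String × Option String))) : Decidable (Spec_merge_selector_rows_py existing incoming out) := by unfold Spec_merge_selector_rows_py; infer_instance

-- ===== CLAIM (what is proved, stated in full; the proofs are below) =====
def Claim_equal_merge_selector_rows_py : Prop := ∀ (existing : List (List (String × Option String))) (incoming : List (List (String × Option String))), Dom_merge_selector_rows_py existing incoming → Spec_merge_selector_rows_py existing incoming (merge_selector_rows_py existing incoming)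

-- ===== LEMMAS AND PROOFS =====

-- strip is idempotent (needed because A re-strips the already-stripped fields in _selector_key)
theorem pvDropWhile_idem {α : Type} (p : α → Bool) (l : List α) :
    List.dropWhile p (List.dropWhile p l) = List.dropWhile p l := by
  induction l with
  | nil => simp
  | cons a t ih =>
    by_cases h : p a = true
    · simp [h, ih]
    · simp [h]

theorem pvDropWhile_fix_of_prefix {α : Type} (p : α → Bool) {u v : List α}
    (hu : List.dropWhile p u = u) (hv : v <+: u) : List.dropWhile p v = v := by
  cases v with
  | nil => simp
  | cons c v' =>
    obtain ⟨t, ht⟩ := hv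
    have hc : p c = false := by
      by_contra h
      have hc' : p c = true := by
        cases hpc : p c
        · exact absurd hpc h
        · rfl
      have : List.dropWhile p u = List.dropWhile p (v' ++ t) := by
        rw [← ht]; simp [hc']
      have hlen : u.length ≤ (v' ++ t).length := by
        rw [hu] at this
        calc u.length = (List.dropWhile p (v' ++ t)).length := by rw [this]
          _ ≤ (v' ++ t).length := List.length_dropWhile_le _ _
      rw [← ht] at hlen
      simp at hlen
    simp [hc]

theorem pvChars_strip_idem (cs : List Char) :
    PySem.Chars.strip (PySem.Chars.strip cs) = PySem.Chars.strip cs := by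
  unfold PySem.Chars.strip PySem.Chars.lstrip PySem.Chars.rstrip
  set p := PySem.Chars.isspace with hp
  set t := List.dropWhile p cs with ht
  set w := (List.dropWhile p t.reverse).reverse with hw
  have hwt : w <+: t := by
    have hsuf := List.dropWhile_suffix (l := t.reverse) (p := p)
    exact List.reverse_suffix.mp (by rw [hw, List.reverse_reverse]; exact hsuf)
  have hut : List.dropWhile p t = t := by rw [ht]; exact pvDropWhile_idem p cs
  have hdw : List.dropWhile p w = w := pvDropWhile_fix_of_prefix p hut hwt
  rw [hdw, hw, List.reverse_reverse, pvDropWhile_idem]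

theorem pvStr_strip_idem (s : String) :
    PySem.Str.strip (PySem.Str.strip s) = PySem.Str.strip s := by
  simp [PySem.Str.strip, pvChars_strip_idem]

-- key of the normalized value of a row
def pvK (r : List (String × Option String)) : String × String × String := pvSelectorKey (pvValue r)

-- a row whose three selector fields normalize to empty is skipped
def pvBad (r : List (String × Option String)) : Bool :=
  (pvOptStr (pvRawStr r "css_selector")).isNone &&
  (pvOptStr (pvRawStr r "xpath")).isNone &&
  (pvOptStr (pvRawStr r "regex")).isNone

-- the values emitted by A's normalization loop run with initial seen-set s
def pvEmit (s : PySem.Set (String × String × String)) :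
    List (List (String × Option String)) → List (List (String × Option String))
  | [] => []
  | r :: t =>
    if pvBad r then pvEmit s t
    else if pvK r ∈ s then pvEmit s t
    else pvValue r :: pvEmit (PySem.Set.add s (pvK r)) t

-- the seen-set after that loop
def pvAfter (s : PySem.Set (String × String × String)) :
    List (List (String × Option String)) → PySem.Set (String × String × String)
  | [] => s
  | r :: t =>
    if pvBad r then pvAfter s t
    else if pvK r ∈ s then pvAfter s t
    else pvAfter (PySem.Set.add s (pvK r)) t

-- characterization of the normalize fold
theorem pvNorm_fold (xs : List (List (String × Option String)))
    (s : PySem.Set (String × String × String)) (a : List (List (String × Option String))) :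
    xs.foldl pvNormStep (s, a) = (pvAfter s xs, a ++ pvEmit s xs) := by
  induction xs generalizing s a with
  | nil => simp [pvEmit, pvAfter]
  | cons r t ih =>
    simp only [List.foldl_cons, pvNormStep, pvEmit, pvAfter, pvBad, pvK]
    by_cases hb : ((pvOptStr (pvRawStr r "css_selector")).isNone &&
        (pvOptStr (pvRawStr r "xpath")).isNone &&
        (pvOptStr (pvRawStr r "regex")).isNone) = true
    · simp [hb, ih]
    · simp only [Bool.not_eq_true] at hb
      by_cases hc : pvSelectorKey (pvValue r) ∈ s
      · simp [hb, hc, ih]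
      · simp [hb, hc, ih]

-- the key list of emitted rows regenerates the seen-set
theorem pvAfter_eq_update (xs : List (List (String × Option String)))
    (s : PySem.Set (String × String × String)) :
    PySem.Set.update s ((pvEmit s xs).map pvSelectorKey) = pvAfter s xs := by
  induction xs generalizing s with
  | nil => simp [pvEmit, pvAfter, PySem.Set.update]
  | cons r t ih =>
    simp only [pvEmit, pvAfter]
    by_cases hb : pvBad r = true
    · simp [hb, ih]
    · simp only [Bool.not_eq_true] at hb
      by_cases hc : pvK r ∈ s
      · simp [hb, hc, ih]
      · simp only [hb, Bool.false_eq_true, if_false, hc, List.map_cons]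
        have hK : pvSelectorKey (pvValue r) = pvK r := rfl
        rw [hK, PySem.Set.update_cons, ih]

-- A's second loop over already-normalized rows equals re-running the full normalization
-- against the bigger seen-set
theorem pvPhase2 (xs : List (List (String × Option String)))
    (t s : PySem.Set (String × String × String)) (a : List (List (String × Option String)))
    (hts : ∀ k, k ∈ t → k ∈ s) :
    (pvEmit t xs).foldl
      (fun st row =>
        let fingerprint := pvSelectorKey row
        if PySem.Set.contains st.1 fingerprint then st
        else (PySem.Set.add st.1 fingerprint, st.2 ++ [row]))
      (s, a) = (pvAfter s xs, a ++ pvEmit s xs) := by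
  induction xs generalizing t s a with
  | nil => simp [pvEmit, pvAfter]
  | cons r u ih =>
    simp only [pvEmit, pvAfter]
    by_cases hb : pvBad r = true
    · simp only [hb, if_true]; exact ih t s a hts
    · simp only [Bool.not_eq_true] at hb
      by_cases hct : pvK r ∈ t
      · have hcs : pvK r ∈ s := hts _ hct
        simp only [hb, Bool.false_eq_true, if_false, hct, if_true, hcs]
        exact ih t s a hts
      · by_cases hcs : pvK r ∈ s
        · simp only [hb, Bool.false_eq_true, if_false, hct, hcs, if_true, List.foldl_cons]
          have hK : pvSelectorKey (pvValue r) = pvK r := rfl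
          have hcb : PySem.Set.contains s (pvSelectorKey (pvValue r)) = true := by
            rw [hK, PySem.Set.contains_iff]; exact hcs
          rw [if_pos hcb]
          exact ih (PySem.Set.add t (pvK r)) s a (by
            intro k hk
            rcases (PySem.Set.mem_add _ _ _).1 hk with h | h
            · exact hts _ h
            · subst h; exact hcs)
        · simp only [hb, Bool.false_eq_true, if_false, hct, hcs, List.foldl_cons]
          have hK : pvSelectorKey (pvValue r) = pvK r := rfl
          have hcb : ¬ PySem.Set.contains s (pvSelectorKey (pvValue r)) = true := by
            rw [hK, PySem.Set.contains_iff]; exact hcs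
          rw [if_neg hcb, hK]
          rw [ih (PySem.Set.add t (pvK r)) (PySem.Set.add s (pvK r)) (a ++ [pvValue r])
            (by
              intro k hk
              rcases (PySem.Set.mem_add _ _ _).1 hk with h | h
              · exact (PySem.Set.mem_add _ _ _).2 (Or.inl (hts _ h))
              · exact (PySem.Set.mem_add _ _ _).2 (Or.inr h))]
          simp

-- emitting over a concatenation splits at the seen-set after the first part
theorem pvEmit_append (xs ys : List (List (String × Option String)))
    (s : PySem.Set (String × String × String)) :
    pvEmit s (xs ++ ys) = pvEmit s xs ++ pvEmit (pvAfter s xs) ys := by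
  induction xs generalizing s with
  | nil => simp [pvEmit, pvAfter]
  | cons r t ih =>
    simp only [List.cons_append, pvEmit, pvAfter]
    by_cases hb : pvBad r = true
    · simp [hb, ih]
    · simp only [Bool.not_eq_true] at hb
      by_cases hc : pvK r ∈ s
      · simp [hb, hc, ih]
      · simp [hb, hc, ih]

-- (pvOptStr s).getD "" undoes the 'or None'
theorem pvGetD_optStr (s : String) : (pvOptStr s).getD "" = s := by
  unfold pvOptStr; split_ifs with h <;> simp [h]

-- A's _selector_key on a normalized value computes B's key
theorem pvSelectorKey_value (r : List (String × Option String)) :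
    pvSelectorKey (pvValue r) =
      ((pvOptStr (pvRawStr r "css_selector")).getD "",
       (pvOptStr (pvRawStr r "xpath")).getD "",
       (pvOptStr (pvRawStr r "regex")).getD "") := by
  simp [pvSelectorKey, pvValue, pvRawStr, PySem.Dict.get?_mk_cons, pvGetD_optStr, pvStr_strip_idem]

-- B's per-row normalizer on a skipped / kept row
theorem pvNormRow_none (r : List (String × Option String)) (h : pvBad r = true) :
    pvNormalizeRow r = none := by
  unfold pvNormalizeRow
  unfold pvBad at h
  simp [h]

theorem pvNormRow_some (r : List (String × Option String)) (h : pvBad r = false) :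
    pvNormalizeRow r = some (pvK r, pvValue r) := by
  unfold pvNormalizeRow
  unfold pvBad at h
  simp only [h, Bool.false_eq_true, if_false]
  rw [pvK, pvSelectorKey_value, pvValue]

-- B's dict loop emits exactly A's normalization output
theorem pvBFold (xs : List (List (String × Option String)))
    (d : PySem.Dict (String × String × String) (List (String × Option String)))
    (s : PySem.Set (String × String × String))
    (hnd : d.keys.Nodup) (hmem : ∀ k, k ∈ d.keys ↔ k ∈ s) :
    PySem.Dict.values (xs.foldl pvBStep d) = d.values ++ pvEmit s xs := by
  induction xs generalizing d s with
  | nil => simp [pvEmit]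
  | cons r t ih =>
    simp only [List.foldl_cons, pvEmit]
    by_cases hb : pvBad r = true
    · simp only [hb, if_true, pvBStep, pvNormRow_none r hb]
      exact ih d s hnd hmem
    · simp only [Bool.not_eq_true] at hb
      simp only [pvBStep, pvNormRow_some r hb, hb, Bool.false_eq_true, if_false]
      by_cases hc : pvK r ∈ s
      · have hk : (d.contains (pvK r)) = true := by
          rw [PySem.Dict.contains_iff_mem_keys]
          exact (hmem _).2 hc
        simp only [hc, if_true, PySem.Dict.setdefault_of_contains d _ hk]
        exact ih d s hnd hmem
      · have hk : (d.contains (pvK r)) = false := by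
          rw [Bool.eq_false_iff]
          intro h
          exact hc ((hmem _).1 ((PySem.Dict.contains_iff_mem_keys d _).1 h))
        simp only [hc, if_false]
        rw [PySem.Dict.setdefault_of_not_contains d _ hk]
        rw [ih (d.insert (pvK r) (pvValue r)) (PySem.Set.add s (pvK r))
          (PySem.Dict.nodup_keys_insert _ _ _ hnd)
          (by
            intro k
            rw [PySem.Dict.mem_keys_insert, PySem.Set.mem_add]
            constructor
            · rintro (h | h)
              · exact Or.inr h
              · exact Or.inl ((hmem _).1 h)
            · rintro (h | h)
              · exact Or.inr ((hmem _).2 h)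
              · exact Or.inl h)]
        have hv : (d.insert (pvK r) (pvValue r)).values = d.values ++ [pvValue r] := by
          show ((d.insert (pvK r) (pvValue r)).items.map (·.2)) = d.items.map (·.2) ++ [pvValue r]
          rw [PySem.Dict.items_insert_of_not_contains d _ hk]
          simp
        rw [hv]
        simp

-- ===== VERDICT (by name: the statement is the Claim_ definition above) =====
theorem merge_selector_rows_py_spec : Claim_equal_merge_selector_rows_py := by
  intro existing incoming _
  unfold Spec_merge_selector_rows_py merge_selector_rows_py merge_selector_rows_py_alt pvNormalizeRows
  simp only [pvNorm_fold]
  have hseen : PySem.Set.ofList ((pvEmit PySem.Set.empty existing).map pvSelectorKey)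
      = pvAfter PySem.Set.empty existing := by
    rw [← PySem.Set.update_nil_left]
    exact pvAfter_eq_update existing PySem.Set.empty
  simp only [List.nil_append, hseen]
  rw [pvPhase2 incoming PySem.Set.empty (pvAfter PySem.Set.empty existing)
    (pvEmit PySem.Set.empty existing) (by intro k hk; cases hk)]
  rw [pvBFold (existing ++ incoming) PySem.Dict.empty PySem.Set.empty (by simp) (by simp [PySem.Set.empty])]
  rw [pvEmit_append]
  have hve : (PySem.Dict.empty : PySem.Dict (String × String × String) (List (String × Option String))).values = [] := rfl
  rw [hve]
  simp
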